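-- pv_equiv track=rewrite | github.com/colecperry/algorithms | LeetCode/1652.py | decrypt2
-- ===== SOURCE A (Python) =====
-- def decrypt2(code, k):
--     result = [0 for _ in range(len(code))] # Initialize output array
--     if k == 0: # Stop code if k == 0
--         return result
--     # Create pointers for the initial window and initial sum for k > 0 (window will move later)
--     start, end, window_sum = 1, k, 0
--
--     # if k < 0, replace the ith number with the sum of the previous k numbers.
--     if k < 0: # If k < 0,
--         start = len(code) - abs(k) # The starting point of the window will be before the length - abs(k)
--         end = len(code) - 1 # The ending point of the window will be last index of the array
--
--     for i in range(start, end + 1): # Sum up numbers in the window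
--         window_sum += code[i]
--
--     # Scan through the code array as i moving to the right, update the window sum.
--     for i in range(len(code)):
--         result[i] = window_sum # Add the current sum to the result
--         window_sum -= code[start % len(code)] # Subtract the value in input array leaving the window
--         window_sum += code[(end + 1) % len(code)] # Add the value coming into window to the sum
--         start += 1 # Move pointers forward
--         end += 1
--     return result
-- ===== SOURCE B (Python) =====
-- def decrypt2(code, k):
--     # Direct definition: each output element is the sum of the k following
--     # (or |k| preceding, for k < 0) elements, taken cyclically.
--     n = len(code)
--     if k == 0:
--         return [0] * n
--     if k > 0:
--         return [sum(code[(i + j) % n] for j in range(1, k + 1)) for i in range(n)]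
--     return [sum(code[(i + j) % n] for j in range(k, 0)) for i in range(n)]
-- ===== Notes on version B (the rewrite author's own statement) =====
-- stated objective: simpler
-- what changed: Replaces A's sliding-window scan with moving start/end pointers by a direct per-index comprehension that sums the k cyclic neighbours from the definition.
import Mathlib
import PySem

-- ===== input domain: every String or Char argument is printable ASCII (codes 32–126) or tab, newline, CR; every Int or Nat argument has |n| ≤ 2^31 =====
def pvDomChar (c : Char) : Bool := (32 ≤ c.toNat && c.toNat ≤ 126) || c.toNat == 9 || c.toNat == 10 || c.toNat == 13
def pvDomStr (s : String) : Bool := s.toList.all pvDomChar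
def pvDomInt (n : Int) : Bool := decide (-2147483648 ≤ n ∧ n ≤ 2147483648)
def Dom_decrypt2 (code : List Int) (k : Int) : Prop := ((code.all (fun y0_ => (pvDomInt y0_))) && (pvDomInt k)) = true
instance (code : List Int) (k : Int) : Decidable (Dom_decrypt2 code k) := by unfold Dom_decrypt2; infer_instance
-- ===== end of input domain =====

-- B computes each output directly as the sum of the k cyclic neighbours instead of A's sliding window with moving pointers; objective: simpler.


-- ===== PORT A =====
def decrypt2 (code : List Int) (k : Int) : List Int :=
  let result : List Int := List.replicate code.length 0
  if k = 0 then result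
  else
    let start : Int := if k < 0 then (code.length : Int) - |k| else 1
    let «end» : Int := if k < 0 then (code.length : Int) - 1 else k
    let ws : Int := (PySem.List.pyRange start («end» + 1) 1).foldl
      (fun s i => s + (PySem.List.pyGet? code i).getD 0) 0
    let fin := (List.range code.length).foldl
      (fun (st : List Int × Int × Int × Int) i =>
        (st.1.set i st.2.1,
         st.2.1 - (PySem.List.pyGet? code (PySem.Int.mod st.2.2.1 (code.length : Int))).getD 0
               + (PySem.List.pyGet? code (PySem.Int.mod (st.2.2.2 + 1) (code.length : Int))).getD 0,
         st.2.2.1 + 1, st.2.2.2 + 1))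
      (result, ws, start, «end»)
    fin.1

-- ===== PORT B =====
def decrypt2_alt (code : List Int) (k : Int) : List Int :=
  if k = 0 then List.replicate code.length 0
  else if 0 < k then
    (List.range code.length).map (fun i : Nat =>
      ((PySem.List.pyRange 1 (k + 1) 1).map (fun j =>
        (PySem.List.pyGet? code (PySem.Int.mod ((i : Int) + j) (code.length : Int))).getD 0)).sum)
  else
    (List.range code.length).map (fun i : Nat =>
      ((PySem.List.pyRange k 0 1).map (fun j =>
        (PySem.List.pyGet? code (PySem.Int.mod ((i : Int) + j) (code.length : Int))).getD 0)).sum)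

-- ===== PRECONDITION & SPEC =====
-- Pre_ admits exactly the inputs on which Python A returns: outside it (k ≠ 0 with empty code,
-- k ≥ len(code), or k < -2*len(code)) A's first window loop raises IndexError.
def Pre_decrypt2 (code : List Int) (k : Int) : Prop :=
  k = 0 ∨ (code ≠ [] ∧ -(2 * (code.length : Int)) ≤ k ∧ k < (code.length : Int))
instance (code : List Int) (k : Int) : Decidable (Pre_decrypt2 code k) := by
  unfold Pre_decrypt2; infer_instance
def pvWitness_decrypt2 : List Int × Int := ([5, 7, 1, 4], 3)

def Spec_decrypt2 (code : List Int) (k : Int) (out : List Int) : Prop := out = decrypt2_alt code k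
instance (code : List Int) (k : Int) (out : List Int) : Decidable (Spec_decrypt2 code k out) := by
  unfold Spec_decrypt2; infer_instance

-- ===== CLAIM (what is proved, stated in full; the proofs are below) =====
def Claim_equal_decrypt2 : Prop := ∀ (code : List Int) (k : Int), Dom_decrypt2 code k → Pre_decrypt2 code k → Spec_decrypt2 code k (decrypt2 code k)

-- ===== LEMMAS AND PROOFS =====

-- the cyclic element access code[t % n] shared by both windows
def gC (code : List Int) (t : Int) : Int :=
  (PySem.List.pyGet? code (PySem.Int.mod t (code.length : Int))).getD 0

-- B's per-index window sum (the body of B's comprehension, both signs of k)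
def SB (code : List Int) (k : Int) (i : Int) : Int :=
  ((PySem.List.pyRange (if k < 0 then k else 1) (if k < 0 then 0 else k + 1) 1).map
    (fun j => gC code (i + j))).sum

theorem pyGet?_mod (code : List Int) (i : Int) (hn : 0 < code.length)
    (hlo : -(code.length : Int) ≤ i) (hhi : i < code.length) :
    PySem.List.pyGet? code i = PySem.List.pyGet? code (PySem.Int.mod i (code.length : Int)) := by
  have hpos : (0:Int) < (code.length : Int) := by exact_mod_cast hn
  rcases (by omega : 0 ≤ i ∨ i < 0) with h | h
  · rw [PySem.Int.mod_eq_emod_of_pos hpos, Int.emod_eq_of_lt h hhi]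
  · have hmod : PySem.Int.mod i (code.length : Int) = i + code.length := by
      rw [PySem.Int.mod_eq_emod_of_pos hpos]
      have h1 := Int.add_mul_emod_self_left (a := i) (b := (code.length : Int)) (c := 1)
      rw [mul_one] at h1
      rw [← h1, Int.emod_eq_of_lt (by omega) (by omega)]
    rw [hmod]
    simp only [PySem.List.pyGet?, PySem.List.pyIdx?]
    split_ifs <;> try omega
    congr 2
    omega

theorem sum_shift (f : Int → Int) (K : Nat) (x : Int) :
    ((List.range K).map (fun t : Nat => f (x + 1 + (t : Int)))).sum
      = ((List.range K).map (fun t : Nat => f (x + (t : Int)))).sum - f x + f (x + K) := by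
  induction K generalizing x with
  | zero => simp
  | succ K ih =>
    rw [List.range_succ, List.map_append, List.map_append, List.sum_append, List.sum_append,
      ih x]
    simp only [List.map_cons, List.map_nil, List.sum_cons, List.sum_nil]
    have h1 : x + 1 + (K:Int) = x + ((K:Int) + 1) := by ring
    rw [h1]
    push_cast
    ring

theorem gC_period (code : List Int) (t : Int) :
    gC code (t + (code.length : Int)) = gC code t := by
  simp [gC, PySem.Int.mod, Int.add_fmod_right]

theorem SB_shift (code : List Int) (k : Int) (i : Int) :
    SB code k i
      = ((List.range k.natAbs).map
          (fun t : Nat => gC code (i + (if k < 0 then k else 1) + (t : Int)))).sum := by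
  unfold SB
  rw [PySem.List.pyRange_one, List.map_map]
  split_ifs with h
  · have hK : (0 - k).toNat = k.natAbs := by omega
    rw [hK]
    refine congrArg List.sum (List.map_congr_left ?_)
    intro t _
    simp only [Function.comp]
    congr 1
    ring
  · have hK : (k + 1 - 1).toNat = k.natAbs := by omega
    rw [hK]
    refine congrArg List.sum (List.map_congr_left ?_)
    intro t _
    simp only [Function.comp]
    congr 1
    ring

theorem SB_succ (code : List Int) (k : Int) (hk : k ≠ 0) (i : Int) :
    SB code k (i + 1)
      = SB code k i
        - gC code ((if k < 0 then (code.length : Int) - |k| else 1) + i)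
        + gC code ((if k < 0 then (code.length : Int) - 1 else k) + 1 + i) := by
  rw [SB_shift, SB_shift]
  split_ifs with h
  · have e1 : ∀ t : Nat, i + 1 + k + (t:Int) = (i + k) + 1 + (t:Int) := fun t => by ring
    calc ((List.range k.natAbs).map (fun t : Nat => gC code (i + 1 + k + (t:Int)))).sum
        = ((List.range k.natAbs).map (fun t : Nat => gC code ((i + k) + 1 + (t:Int)))).sum := by
          refine congrArg List.sum (List.map_congr_left ?_); intro t _; rw [e1 t]
      _ = ((List.range k.natAbs).map (fun t : Nat => gC code ((i + k) + (t:Int)))).sum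
            - gC code (i + k) + gC code (i + k + (k.natAbs : Int)) := sum_shift _ _ _
      _ = _ := by
          have h2 : i + k + (k.natAbs : Int) = i := by omega
          have h3 : (code.length : Int) - |k| + i = (i + k) + (code.length : Int) := by
            rw [abs_of_neg h]; ring
          have h4 : (code.length : Int) - 1 + 1 + i = i + (code.length : Int) := by ring
          rw [h2, h3, h4, gC_period, gC_period]
  · have h0 : 0 < k := lt_of_le_of_ne (by omega) (Ne.symm hk)
    calc ((List.range k.natAbs).map (fun t : Nat => gC code (i + 1 + 1 + (t:Int)))).sum
        = ((List.range k.natAbs).map (fun t : Nat => gC code ((i + 1) + 1 + (t:Int)))).sum := by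
          ring_nf
      _ = ((List.range k.natAbs).map (fun t : Nat => gC code ((i + 1) + (t:Int)))).sum
            - gC code (i + 1) + gC code (i + 1 + (k.natAbs : Int)) := sum_shift _ _ _
      _ = _ := by
          have h2 : i + 1 + (k.natAbs : Int) = k + 1 + i := by omega
          have h3 : (1 : Int) + i = i + 1 := by ring
          rw [h2, h3]

theorem ws0_eq (code : List Int) (k : Int) (hpre : Pre_decrypt2 code k) (hk : k ≠ 0) :
    (PySem.List.pyRange (if k < 0 then (code.length : Int) - |k| else 1)
        ((if k < 0 then (code.length : Int) - 1 else k) + 1) 1).foldl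
      (fun s i => s + (PySem.List.pyGet? code i).getD 0) 0
    = SB code k 0 := by
  rcases hpre with h0 | ⟨hne, hlo, hhi⟩
  · exact absurd h0 hk
  have hn : 0 < code.length := List.length_pos_iff.mpr hne
  rw [PySem.List.foldl_add, zero_add, PySem.List.pyRange_one, List.map_map, SB_shift]
  split_ifs with h
  · have hK : ((code.length : Int) - 1 + 1 - ((code.length : Int) - |k|)).toNat = k.natAbs := by
      rw [abs_of_neg h]; omega
    rw [hK]
    refine congrArg List.sum (List.map_congr_left ?_)
    intro t ht
    rw [List.mem_range] at ht
    have htI : (t : Int) < k.natAbs := by exact_mod_cast ht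
    simp only [Function.comp]
    have harg : (code.length : Int) - |k| + (t:Int) = (0 + k + (t:Int)) + (code.length : Int) := by
      rw [abs_of_neg h]; ring
    rw [harg, ← gC_period code (0 + k + (t:Int))]
    show (PySem.List.pyGet? code _).getD 0 = (PySem.List.pyGet? code _).getD 0
    rw [pyGet?_mod code _ hn (by omega) (by omega)]
  · have h0 : 0 < k := lt_of_le_of_ne (by omega) (Ne.symm hk)
    have hK : (k + 1 - 1).toNat = k.natAbs := by omega
    rw [hK]
    refine congrArg List.sum (List.map_congr_left ?_)
    intro t ht
    rw [List.mem_range] at ht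
    have htI : (t : Int) < k.natAbs := by exact_mod_cast ht
    simp only [Function.comp]
    have harg : (0:Int) + 1 + (t:Int) = 1 + (t:Int) := by ring
    rw [harg]
    show (PySem.List.pyGet? code (1 + (t:Int))).getD 0 = gC code (1 + (t:Int))
    unfold gC
    rw [pyGet?_mod code _ hn (by omega) (by omega)]

theorem set_map_range (n m : Nat) (S : Int → Int) (hm : m < n) :
    ((List.range n).map (fun j : Nat => if j < m then S (j:Int) else 0)).set m (S (m:Int))
      = (List.range n).map (fun j : Nat => if j < m + 1 then S (j:Int) else 0) := by
  apply List.ext_getElem (by simp)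
  intro i h1 h2
  simp only [List.getElem_set, List.getElem_map, List.getElem_range]
  split_ifs <;> first | rfl | omega | (subst_vars; rfl)

theorem loop_inv (code : List Int) (S : Int → Int) (s0 e0 : Int)
    (hstep : ∀ i : Int, S (i + 1) = S i - gC code (s0 + i) + gC code (e0 + 1 + i)) :
    ∀ m : Nat, m ≤ code.length →
    (List.range m).foldl
        (fun (st : List Int × Int × Int × Int) i =>
          (st.1.set i st.2.1,
           st.2.1 - (PySem.List.pyGet? code (PySem.Int.mod st.2.2.1 (code.length : Int))).getD 0
                 + (PySem.List.pyGet? code (PySem.Int.mod (st.2.2.2 + 1) (code.length : Int))).getD 0,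
           st.2.2.1 + 1, st.2.2.2 + 1))
        (List.replicate code.length 0, S 0, s0, e0)
      = ((List.range code.length).map (fun j : Nat => if j < m then S (j:Int) else 0),
         S (m:Int), s0 + (m:Int), e0 + (m:Int)) := by
  intro m
  induction m with
  | zero =>
    intro _
    simp only [List.range_zero, List.foldl_nil, Nat.cast_zero, add_zero]
    have : (List.range code.length).map (fun j : Nat => if j < 0 then S (j:Int) else 0)
        = List.replicate code.length 0 := by
      calc (List.range code.length).map (fun j : Nat => if j < 0 then S (j:Int) else 0)
          = (List.range code.length).map (fun _ : Nat => (0:Int)) := by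
            refine List.map_congr_left ?_; intro t _; simp
        _ = List.replicate code.length 0 := by
            rw [List.map_const', List.length_range]
    rw [this]
  | succ m ih =>
    intro hle
    have hm : m < code.length := by omega
    rw [List.range_succ, List.foldl_append, ih (by omega), List.foldl_cons, List.foldl_nil]
    refine Prod.ext ?_ (Prod.ext ?_ (Prod.ext ?_ ?_))
    · show ((List.range code.length).map (fun j : Nat => if j < m then S (j:Int) else 0)).set m (S (m:Int))
        = (List.range code.length).map (fun j : Nat => if j < m + 1 then S (j:Int) else 0)
      exact set_map_range _ _ _ hm
    · show S (m:Int) - gC code (s0 + (m:Int)) + gC code (e0 + (m:Int) + 1) = S ((m+1 : Nat) : Int)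
      have h4 : e0 + (m:Int) + 1 = e0 + 1 + (m:Int) := by ring
      have h5 : ((m+1 : Nat) : Int) = (m:Int) + 1 := by push_cast; ring
      rw [h4, h5, hstep]
    · show s0 + (m:Int) + 1 = s0 + ((m+1 : Nat) : Int)
      push_cast; ring
    · show e0 + (m:Int) + 1 = e0 + ((m+1 : Nat) : Int)
      push_cast; ring

theorem decrypt2_alt_eq_map (code : List Int) (k : Int) (hk : k ≠ 0) :
    decrypt2_alt code k = (List.range code.length).map (fun i : Nat => SB code k (i : Int)) := by
  unfold decrypt2_alt SB gC
  rcases (by omega : k < 0 ∨ 0 < k) with h | h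
  · rw [if_neg hk, if_neg (by omega), if_pos h, if_pos h]
  · rw [if_neg hk, if_pos h, if_neg (by omega), if_neg (by omega)]

theorem decrypt2_eq (code : List Int) (k : Int) (hpre : Pre_decrypt2 code k) :
    decrypt2 code k = decrypt2_alt code k := by
  by_cases hk : k = 0
  · subst hk
    unfold decrypt2 decrypt2_alt
    simp
  · rcases hpre with h0 | ⟨hne, hlo, hhi⟩
    · exact absurd h0 hk
    have hn : 0 < code.length := List.length_pos_iff.mpr hne
    rw [decrypt2_alt_eq_map code k hk]
    show (if k = 0 then List.replicate code.length 0 else _) = _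
    rw [if_neg hk]
    rw [ws0_eq code k (Or.inr ⟨hne, hlo, hhi⟩) hk]
    rw [loop_inv code (SB code k)
      (if k < 0 then (code.length : Int) - |k| else 1)
      (if k < 0 then (code.length : Int) - 1 else k)
      (fun i => SB_succ code k hk i) code.length (le_refl _)]
    show (List.range code.length).map (fun j : Nat => if j < code.length then SB code k (j:Int) else 0)
        = (List.range code.length).map (fun i : Nat => SB code k (i:Int))
    refine List.map_congr_left ?_
    intro t ht
    rw [List.mem_range] at ht
    rw [if_pos ht]

-- ===== VERDICT (by name: the statement is the Claim_ definition above) =====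
theorem decrypt2_spec : Claim_equal_decrypt2 := by
  intro code k _ hpre
  show decrypt2 code k = decrypt2_alt code k
  exact decrypt2_eq code k hpre
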